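-- pv_equiv track=rewrite | github.com/retrography/pdf2markdown4llm | pdf2markdown4llm/pdf2markdown4llm.py | _process_mixed_styles
-- ===== SOURCE A (Python) =====
-- from typing import List, Dict, Tuple, Optional, Union, Callable, Literal
--
-- def is_bold_font(fontname: Optional[str]) -> bool:
--     """
--     Determine if a font is bold based on its name.
--     Uses stricter rules to prevent over-detection of bold text.
--     """
--     if not fontname:
--         return False
--
--     # Convert font name to lowercase for comparison
--     fontname_lower = fontname.lower()
--
--     # Common bold font name patterns
--     bold_indicators = {
--         'bold',      # Most common indicator
--         '-bold',     # Often used with hyphen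
--         '.bold',     # Sometimes used with dot
--         ' bold',     # Used with space
--     }
--
--     # Exclude certain terms that might contain 'bold' but aren't necessarily bold
--     exclude_terms = {
--         'semibold',  # Usually lighter than true bold
--         'demibold',  # Usually lighter than true bold
--         'book',      # Regular weight
--         'light',     # Light weight
--         'regular',   # Regular weight
--     }
--
--     # First check if any exclusion terms are in the font name
--     if any(term in fontname_lower for term in exclude_terms):
--         return False
--
--     # Then check for bold indicators
--     return any(indicator in fontname_lower for indicator in bold_indicators)
--
-- def _process_mixed_styles(line: List[Tuple[str, Optional[str]]]) -> str:
--     """Process a line with mixed text styles."""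
--     result = []
--     current_bold = False
--     current_text = []
--
--     for text, fontname in line:
--         is_bold = is_bold_font(fontname)
--
--         if is_bold != current_bold:
--             if current_text:
--                 text_segment = " ".join(current_text)
--                 if current_bold:
--                     result.append(f"**{text_segment}**")
--                 else:
--                     result.append(text_segment)
--                 current_text = []
--             current_bold = is_bold
--
--         current_text.append(text)
--
--     # Process remaining text
--     if current_text:
--         text_segment = " ".join(current_text)
--         if current_bold:
--             result.append(f"**{text_segment}**")
--         else:
--             result.append(text_segment)
--
--     return " ".join(result)
-- ===== SOURCE B (Python) =====
-- from itertools import groupby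
-- from typing import List, Tuple, Optional
--
-- def is_bold_font(fontname: Optional[str]) -> bool:
--     if not fontname:
--         return False
--     fontname_lower = fontname.lower()
--     if any(term in fontname_lower for term in ('semibold', 'demibold', 'book', 'light', 'regular')):
--         return False
--     # every original indicator ('bold', '-bold', '.bold', ' bold') contains 'bold'
--     return 'bold' in fontname_lower
--
-- def _process_mixed_styles(line: List[Tuple[str, Optional[str]]]) -> str:
--     parts = []
--     for bold, group in groupby(line, key=lambda seg: is_bold_font(seg[1])):
--         segment = " ".join(text for text, _ in group)
--         parts.append(f"**{segment}**" if bold else segment)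
--     return " ".join(parts)
-- ===== Notes on version B (the rewrite author's own statement) =====
-- stated objective: idiomatic
-- what changed: Replaces the manual current_bold/current_text accumulator with itertools.groupby over maximal same-boldness runs, and collapses the four bold indicators (each of which contains 'bold') into the single substring test 'bold'.
import Mathlib
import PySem

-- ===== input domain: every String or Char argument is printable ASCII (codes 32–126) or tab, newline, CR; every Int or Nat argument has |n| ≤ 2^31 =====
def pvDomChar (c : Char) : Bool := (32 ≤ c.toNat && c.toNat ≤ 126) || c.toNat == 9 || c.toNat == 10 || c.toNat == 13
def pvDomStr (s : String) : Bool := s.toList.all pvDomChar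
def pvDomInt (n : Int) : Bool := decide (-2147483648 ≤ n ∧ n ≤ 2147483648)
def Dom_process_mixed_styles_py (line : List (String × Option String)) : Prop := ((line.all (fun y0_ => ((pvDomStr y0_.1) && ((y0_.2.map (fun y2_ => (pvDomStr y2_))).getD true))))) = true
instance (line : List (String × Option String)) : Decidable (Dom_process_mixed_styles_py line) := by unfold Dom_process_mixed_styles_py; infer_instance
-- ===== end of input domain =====

-- B: groupby-style grouping into maximal same-boldness runs instead of a manual
-- accumulator; bold indicators collapsed to the single substring 'bold'. Same output, proved equal.
-- ===== PORT A =====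
def is_bold_font_py (fontname : Option String) : Bool :=
  match fontname with
  | none => false
  | some f =>
    if f == "" then false
    else
      let fontname_lower := PySem.Str.lower f
      if ["semibold", "demibold", "book", "light", "regular"].any
           (fun term => PySem.Str.isIn term fontname_lower) then false
      else ["bold", "-bold", ".bold", " bold"].any
           (fun ind => PySem.Str.isIn ind fontname_lower)

def pvStepA (st : List String × Bool × List String) (seg : String × Option String) :
    List String × Bool × List String :=
  let result := st.1
  let current_bold := st.2.1
  let current_text := st.2.2
  let is_bold := is_bold_font_py seg.2
  if is_bold ≠ current_bold then
    if current_text ≠ [] then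
      let text_segment := PySem.Str.join " " current_text
      let result := if current_bold then result ++ ["**" ++ text_segment ++ "**"]
                    else result ++ [text_segment]
      (result, is_bold, [seg.1])
    else (result, is_bold, current_text ++ [seg.1])
  else (result, current_bold, current_text ++ [seg.1])

def process_mixed_styles_py (line : List (String × Option String)) : String :=
  let st := line.foldl pvStepA ([], false, [])
  let result :=
    if st.2.2 ≠ [] then
      let text_segment := PySem.Str.join " " st.2.2
      if st.2.1 then st.1 ++ ["**" ++ text_segment ++ "**"] else st.1 ++ [text_segment]
    else st.1
  PySem.Str.join " " result

-- ===== PORT B =====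
def is_bold_font_alt (fontname : Option String) : Bool :=
  match fontname with
  | none => false
  | some f =>
    if f == "" then false
    else
      let fontname_lower := PySem.Str.lower f
      if ["semibold", "demibold", "book", "light", "regular"].any
           (fun term => PySem.Str.isIn term fontname_lower) then false
      else PySem.Str.isIn "bold" fontname_lower

-- itertools.groupby on the (text, bold) pairs: maximal runs of equal boldness
def pvGroupRuns : List (String × Bool) → List (Bool × List String)
  | [] => []
  | (t, b) :: rest =>
    match pvGroupRuns rest with
    | [] => [(b, [t])]
    | (b', ts) :: gs => if b = b' then (b, t :: ts) :: gs else (b, [t]) :: (b', ts) :: gs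

def pvWrap (g : Bool × List String) : String :=
  let segment := PySem.Str.join " " g.2
  if g.1 then "**" ++ segment ++ "**" else segment

def process_mixed_styles_py_alt (line : List (String × Option String)) : String :=
  PySem.Str.join " "
    ((pvGroupRuns (line.map (fun seg => (seg.1, is_bold_font_alt seg.2)))).map pvWrap)

-- ===== PRECONDITION & SPEC =====
def Spec_process_mixed_styles_py (line : List (String × Option String)) (out : String) : Prop := out = process_mixed_styles_py_alt line
instance (line : List (String × Option String)) (out : String) : Decidable (Spec_process_mixed_styles_py line out) := by unfold Spec_process_mixed_styles_py; infer_instance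

-- ===== CLAIM (what is proved, stated in full; the proofs are below) =====
def Claim_equal_process_mixed_styles_py : Prop := ∀ (line : List (String × Option String)), Dom_process_mixed_styles_py line → Spec_process_mixed_styles_py line (process_mixed_styles_py line)

-- ===== LEMMAS AND PROOFS =====

-- merge a pending run onto the front of a run list (same-bool heads coalesce)
def pvCons (b : Bool) (ts : List String) (gs : List (Bool × List String)) :
    List (Bool × List String) :=
  match gs with
  | [] => [(b, ts)]
  | (b', ts') :: gs' => if b = b' then (b, ts ++ ts') :: gs' else (b, ts) :: (b', ts') :: gs'

-- A's post-loop flush as a function of the fold state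
def pvFinish (st : List String × Bool × List String) : List String :=
  if st.2.2 ≠ [] then
    let text_segment := PySem.Str.join " " st.2.2
    if st.2.1 then st.1 ++ ["**" ++ text_segment ++ "**"] else st.1 ++ [text_segment]
  else st.1

lemma bold_eq (f : Option String) : is_bold_font_alt f = is_bold_font_py f := by
  cases f with
  | none => rfl
  | some s =>
    simp only [is_bold_font_alt, is_bold_font_py]
    split_ifs with h1 h2
    · rfl
    · rfl
    · by_cases hb : PySem.Str.isIn "bold" (PySem.Str.lower s) = true
      · simp only [List.any_cons, List.any_nil, Bool.or_false]
        rw [hb]; simp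
      · have hbf : PySem.Str.isIn "bold" (PySem.Str.lower s) = false := by
          simpa using hb
        have hb' : ¬ ("bold".toList <:+: (PySem.Str.lower s).toList) := by
          rw [← PySem.Str.isIn_iff_infix]; exact hb
        have key : ∀ ind : String, "bold".toList <:+: ind.toList →
            PySem.Str.isIn ind (PySem.Str.lower s) = false := by
          intro ind hind
          rw [← Bool.not_eq_true, PySem.Str.isIn_iff_infix]
          exact fun hc => hb' (hind.trans hc)
        simp only [List.any_cons, List.any_nil, Bool.or_false]
        rw [hbf, key "-bold" (by decide), key ".bold" (by decide), key " bold" (by decide)]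
        rfl

lemma pvGroupRuns_cons (t : String) (b : Bool) (rest : List (String × Bool)) :
    pvGroupRuns ((t, b) :: rest) = pvCons b [t] (pvGroupRuns rest) := by
  cases h : pvGroupRuns rest with
  | nil => simp [pvGroupRuns, pvCons, h]
  | cons g gs => cases g with
    | mk b' ts => simp [pvGroupRuns, pvCons, h]

lemma pvCons_pvCons (b : Bool) (ts ts' : List String) (gs : List (Bool × List String)) :
    pvCons b ts (pvCons b ts' gs) = pvCons b (ts ++ ts') gs := by
  cases gs with
  | nil => simp [pvCons]
  | cons g gs' =>
    cases g with
    | mk b' l =>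
      by_cases h : b = b' <;> simp [pvCons, h]

lemma pvCons_ne (b b' : Bool) (ts ts' : List String) (gs : List (Bool × List String))
    (h : b ≠ b') : pvCons b ts (pvCons b' ts' gs) = (b, ts) :: pvCons b' ts' gs := by
  cases gs with
  | nil => simp [pvCons, h]
  | cons g gs' =>
    cases g with
    | mk b'' l =>
      by_cases h2 : b' = b''
      · subst h2; simp [pvCons, h]
      · simp [pvCons, h, h2]

lemma fold_spec (rest : List (String × Option String)) :
    ∀ (result ct : List String) (cb : Bool), ct ≠ [] →
      pvFinish (rest.foldl pvStepA (result, cb, ct)) =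
        result ++
          (pvCons cb ct
            (pvGroupRuns (rest.map (fun seg => (seg.1, is_bold_font_py seg.2))))).map pvWrap := by
  induction rest with
  | nil =>
    intro result ct cb hct
    simp only [List.foldl_nil, List.map_nil, pvGroupRuns, pvCons, pvFinish]
    cases cb <;> simp [hct, pvWrap]
  | cons seg rs ih =>
    intro result ct cb hct
    obtain ⟨t, fn⟩ := seg
    simp only [List.foldl_cons, List.map_cons, pvGroupRuns_cons]
    by_cases hb : is_bold_font_py fn = cb
    · have hstep : pvStepA (result, cb, ct) (t, fn) = (result, cb, ct ++ [t]) := by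
        simp [pvStepA, hb]
      rw [hstep, ih result (ct ++ [t]) cb (by simp), hb, pvCons_pvCons]
    · have hstep : pvStepA (result, cb, ct) (t, fn) =
          ((if cb then result ++ ["**" ++ PySem.Str.join " " ct ++ "**"]
            else result ++ [PySem.Str.join " " ct]), is_bold_font_py fn, [t]) := by
        simp [pvStepA, hb, hct]
      rw [hstep, ih _ [t] _ (by simp),
          pvCons_ne cb (is_bold_font_py fn) ct [t] _ (fun h => hb h.symm)]
      cases cb <;> simp [pvWrap, List.append_assoc]

-- ===== VERDICT (by name: the statement is the Claim_ definition above) =====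
theorem process_mixed_styles_py_spec : Claim_equal_process_mixed_styles_py := by
  intro line _
  show process_mixed_styles_py line = process_mixed_styles_py_alt line
  cases line with
  | nil => rfl
  | cons seg rs =>
    obtain ⟨t, fn⟩ := seg
    have h0 : pvStepA ([], false, []) (t, fn) = ([], is_bold_font_py fn, [t]) := by
      by_cases hb : is_bold_font_py fn = false <;> simp [pvStepA, hb]
    have hA : process_mixed_styles_py ((t, fn) :: rs) =
        PySem.Str.join " " (pvFinish (rs.foldl pvStepA ([], is_bold_font_py fn, [t]))) := by
      simp [process_mixed_styles_py, pvFinish, h0]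
    rw [hA, fold_spec rs [] [t] (is_bold_font_py fn) (by simp)]
    simp [process_mixed_styles_py_alt, pvGroupRuns_cons, bold_eq]
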